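-- pv_equiv track=rewrite | github.com/ruslanmv/ai-gameplay-bot | deployment/control_backend.py | _keys_to_action
-- ===== SOURCE A (Python) =====
-- from typing import Any, Dict, List, Optional, Tuple
--
-- def _keys_to_action(keys: List[str]) -> str:
--     s = set((k or "").lower() for k in keys if isinstance(k, str))
--     if "w" in s:
--         return "move_forward"
--     if "s" in s:
--         return "move_backward"
--     if "a" in s:
--         return "turn_left"
--     if "d" in s:
--         return "turn_right"
--     if "space" in s:
--         return "jump"
--     if "e" in s:
--         return "interact"
--     if "f" in s:
--         return "use_item"
--     if "tab" in s:
--         return "open_inventory"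
--     if "q" in s:
--         return "cast_spell"
--     return "move_forward"
-- ===== SOURCE B (Python) =====
-- _TABLE = {
--     "w": (0, "move_forward"),
--     "s": (1, "move_backward"),
--     "a": (2, "turn_left"),
--     "d": (3, "turn_right"),
--     "space": (4, "jump"),
--     "e": (5, "interact"),
--     "f": (6, "use_item"),
--     "tab": (7, "open_inventory"),
--     "q": (8, "cast_spell"),
-- }
--
-- def _keys_to_action(keys):
--     best = None
--     for k in keys:
--         if isinstance(k, str):
--             r = _TABLE.get((k or "").lower())
--             if r is not None and (best is None or r[0] < best[0]):
--                 best = r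
--     return best[1] if best is not None else "move_forward"
-- ===== Notes on version B (the rewrite author's own statement) =====
-- stated objective: alternative
-- what changed: Replaced the build-a-set-then-probe-nine-actions if-chain by a single pass over the pressed keys keeping the table entry of smallest rank (argmin over a priority table), returning its action or the default.
import Mathlib
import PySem

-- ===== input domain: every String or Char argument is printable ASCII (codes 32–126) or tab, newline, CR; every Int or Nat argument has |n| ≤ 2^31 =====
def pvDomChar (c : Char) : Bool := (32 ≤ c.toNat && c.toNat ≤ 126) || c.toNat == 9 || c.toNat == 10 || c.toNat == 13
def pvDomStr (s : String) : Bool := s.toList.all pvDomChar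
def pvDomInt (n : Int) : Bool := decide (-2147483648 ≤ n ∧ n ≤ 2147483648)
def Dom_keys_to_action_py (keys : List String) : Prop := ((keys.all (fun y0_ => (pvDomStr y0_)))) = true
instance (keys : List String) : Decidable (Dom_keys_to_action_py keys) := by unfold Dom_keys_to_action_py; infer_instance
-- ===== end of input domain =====

-- B replaces A's build-a-set-then-probe-nine-actions if-chain with a single scan of the
-- pressed keys keeping the priority-table entry of smallest rank (objective: alternative).

-- ===== PORT A =====
def keys_to_action_py (keys : List String) : String :=
  let s : PySem.Set String :=
    PySem.Set.ofList (keys.map (fun k => PySem.Str.lower (if k == "" then "" else k)))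
  if s.contains "w" then "move_forward"
  else if s.contains "s" then "move_backward"
  else if s.contains "a" then "turn_left"
  else if s.contains "d" then "turn_right"
  else if s.contains "space" then "jump"
  else if s.contains "e" then "interact"
  else if s.contains "f" then "use_item"
  else if s.contains "tab" then "open_inventory"
  else if s.contains "q" then "cast_spell"
  else "move_forward"

-- ===== PORT B =====
-- Source B's priority table (a dict looked up with .get)
def pvTable : PySem.Dict String (Int × String) :=
  ⟨[("w", ((0 : Int), "move_forward")), ("s", (1, "move_backward")), ("a", (2, "turn_left")),
    ("d", (3, "turn_right")), ("space", (4, "jump")), ("e", (5, "interact")),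
    ("f", (6, "use_item")), ("tab", (7, "open_inventory")), ("q", (8, "cast_spell"))]⟩

def keys_to_action_py_alt (keys : List String) : String :=
  let best : Option (Int × String) :=
    keys.foldl (fun best k =>
      match PySem.Dict.get? pvTable (PySem.Str.lower (if k == "" then "" else k)) with
      | none => best
      | some r =>
        match best with
        | none => some r
        | some b => if r.1 < b.1 then some r else best) none
  match best with
  | some b => b.2
  | none => "move_forward"

-- ===== PRECONDITION & SPEC =====
def Spec_keys_to_action_py (keys : List String) (out : String) : Prop := out = keys_to_action_py_alt keys
instance (keys : List String) (out : String) : Decidable (Spec_keys_to_action_py keys out) := by unfold Spec_keys_to_action_py; infer_instance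

-- ===== CLAIM (what is proved, stated in full; the proofs are below) =====
def Claim_equal_keys_to_action_py : Prop := ∀ (keys : List String), Dom_keys_to_action_py keys → Spec_keys_to_action_py keys (keys_to_action_py keys)

-- ===== LEMMAS AND PROOFS =====

theorem pv_orEmpty (k : String) : (if k == "" then "" else k) = k := by
  by_cases h : k = "" <;> simp [h]

-- left-biased min on ranked options (what B's loop body computes)
def pvMinOpt (b r : Option (Int × String)) : Option (Int × String) :=
  match b, r with
  | none, r => r
  | some b', none => some b'
  | some b', some r' => if r'.1 < b'.1 then some r' else some b'

-- the chain A evaluates, expressed over the list of lowered keys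
def pvBestSpec (L : List String) : Option (Int × String) :=
  if L.contains "w" then some (0, "move_forward")
  else if L.contains "s" then some (1, "move_backward")
  else if L.contains "a" then some (2, "turn_left")
  else if L.contains "d" then some (3, "turn_right")
  else if L.contains "space" then some (4, "jump")
  else if L.contains "e" then some (5, "interact")
  else if L.contains "f" then some (6, "use_item")
  else if L.contains "tab" then some (7, "open_inventory")
  else if L.contains "q" then some (8, "cast_spell")
  else none

theorem pvMinOpt_assoc (a b c : Option (Int × String)) :
    pvMinOpt (pvMinOpt a b) c = pvMinOpt a (pvMinOpt b c) := by
  rcases a with _ | ⟨i, x⟩ <;> rcases b with _ | ⟨j, y⟩ <;> rcases c with _ | ⟨l, z⟩ <;>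
    simp only [pvMinOpt] <;> split_ifs <;> simp only [pvMinOpt] <;> split_ifs <;>
    first | rfl | omega | (exfalso; omega)

theorem pvStep_eq (b : Option (Int × String)) (k : String) :
    (match PySem.Dict.get? pvTable (PySem.Str.lower k) with
      | none => b
      | some r =>
        match b with
        | none => some r
        | some b' => if r.1 < b'.1 then some r else b)
    = pvMinOpt b (PySem.Dict.get? pvTable (PySem.Str.lower k)) := by
  rcases PySem.Dict.get? pvTable (PySem.Str.lower k) with _ | r <;>
    rcases b with _ | b' <;> simp [pvMinOpt]

set_option maxHeartbeats 2000000 in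
theorem pvBestSpec_cons (x : String) (L : List String) :
    pvBestSpec (x :: L) = pvMinOpt (PySem.Dict.get? pvTable x) (pvBestSpec L) := by
  by_cases hw : x = "w"
  · subst hw
    have hg : pvTable.get? "w" = some (0, "move_forward") := by decide
    simp only [pvBestSpec, hg]
    simp [List.contains_cons]
    split_ifs <;> simp [pvMinOpt]
  by_cases hs : x = "s"
  · subst hs
    have hg : pvTable.get? "s" = some (1, "move_backward") := by decide
    simp only [pvBestSpec, hg]
    simp [List.contains_cons]
    split_ifs <;> simp [pvMinOpt]
  by_cases ha : x = "a"
  · subst ha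
    have hg : pvTable.get? "a" = some (2, "turn_left") := by decide
    simp only [pvBestSpec, hg]
    simp [List.contains_cons]
    split_ifs <;> simp [pvMinOpt]
  by_cases hd : x = "d"
  · subst hd
    have hg : pvTable.get? "d" = some (3, "turn_right") := by decide
    simp only [pvBestSpec, hg]
    simp [List.contains_cons]
    split_ifs <;> simp [pvMinOpt]
  by_cases hsp : x = "space"
  · subst hsp
    have hg : pvTable.get? "space" = some (4, "jump") := by decide
    simp only [pvBestSpec, hg]
    simp [List.contains_cons]
    split_ifs <;> simp [pvMinOpt]
  by_cases he : x = "e"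
  · subst he
    have hg : pvTable.get? "e" = some (5, "interact") := by decide
    simp only [pvBestSpec, hg]
    simp [List.contains_cons]
    split_ifs <;> simp [pvMinOpt]
  by_cases hf : x = "f"
  · subst hf
    have hg : pvTable.get? "f" = some (6, "use_item") := by decide
    simp only [pvBestSpec, hg]
    simp [List.contains_cons]
    split_ifs <;> simp [pvMinOpt]
  by_cases ht : x = "tab"
  · subst ht
    have hg : pvTable.get? "tab" = some (7, "open_inventory") := by decide
    simp only [pvBestSpec, hg]
    simp [List.contains_cons]
    split_ifs <;> simp [pvMinOpt]
  by_cases hq : x = "q"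
  · subst hq
    have hg : pvTable.get? "q" = some (8, "cast_spell") := by decide
    simp only [pvBestSpec, hg]
    simp [List.contains_cons]
    split_ifs <;> simp [pvMinOpt]
  · have hg : pvTable.get? x = none := by
      simp only [pvTable, PySem.Dict.get?_mk_cons]
      simp [PySem.Dict.get?, Ne.symm hw, Ne.symm hs, Ne.symm ha, Ne.symm hd, Ne.symm hsp,
        Ne.symm he, Ne.symm hf, Ne.symm ht, Ne.symm hq]
    simp [pvBestSpec, List.contains_cons, hg, pvMinOpt, Ne.symm hw, Ne.symm hs, Ne.symm ha,
      Ne.symm hd, Ne.symm hsp, Ne.symm he, Ne.symm hf, Ne.symm ht, Ne.symm hq]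

theorem pvFold_eq_bestSpec (keys : List String) (b : Option (Int × String)) :
    keys.foldl (fun best k =>
      match PySem.Dict.get? pvTable (PySem.Str.lower k) with
      | none => best
      | some r =>
        match best with
        | none => some r
        | some b' => if r.1 < b'.1 then some r else best) b
    = pvMinOpt b (pvBestSpec (keys.map (fun k => PySem.Str.lower k))) := by
  induction keys generalizing b with
  | nil => rcases b with _ | b' <;> simp [pvBestSpec, pvMinOpt]
  | cons k ks ih =>
    simp only [List.foldl_cons]
    rw [ih]
    simp only [pvStep_eq, List.map_cons, pvBestSpec_cons, ← pvMinOpt_assoc]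

theorem keys_to_action_eq (keys : List String) :
    keys_to_action_py keys = keys_to_action_py_alt keys := by
  unfold keys_to_action_py keys_to_action_py_alt
  simp only [pv_orEmpty]
  rw [pvFold_eq_bestSpec]
  have hmem : ∀ (x : String),
      (PySem.Set.ofList (keys.map (fun k => PySem.Str.lower k))).contains x
      = (keys.map (fun k => PySem.Str.lower k)).contains x := by
    intro x
    simp [PySem.Set.contains, PySem.Set.mem_ofList]
  simp only [hmem]
  unfold pvBestSpec
  split_ifs <;> rfl

-- ===== VERDICT (by name: the statement is the Claim_ definition above) =====
theorem keys_to_action_py_spec : Claim_equal_keys_to_action_py := by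
  intro keys _
  unfold Spec_keys_to_action_py
  exact keys_to_action_eq keys
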